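-- pv_equiv track=rewrite | github.com/TrumanThames/simple_game_ai | tictactoe.py | winsfrom
-- ===== SOURCE A (Python) =====
-- def winsfrom(start, dim, n):
--     wins = set()
--     zeros = {i if start[i] == 0 or start[i] == n-1 else None for i in range(dim)}
--     zeros.discard(None)
--     Z = list(zeros)
--     dictZ = {Z[i]: i for i in range(len(Z))}
--     delta_start = [0]*len(zeros)
--     end = [-1]*dim
--     if len(zeros) == 0:
--         return set()
--     for i in range(1, 2**len(zeros)):
--         config = i
--         for k in range(len(zeros)):
--             delta_start[k] = config % 2
--             config = config >> 1
--         for j in range(dim):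
--             if start[j] == 0:
--                 if delta_start[dictZ[j]] == 1:
--                     end[j] = n-1
--                 else:
--                     end[j] = start[j]
--             elif start[j] == n-1:
--                 if delta_start[dictZ[j]] == 1:
--                     end[j] = 0
--                 else:
--                     end[j] = start[j]
--             else:
--                 end[j] = start[j]
--         win = tuple(start), tuple(end)
--         if win[0] < win[1]:
--             wins.add((win[0], win[1]))
--         else:
--             wins.add((win[1], win[0]))
--     return wins
-- ===== SOURCE B (Python) =====
-- def winsfrom(start, dim, n):
--     # Axes (within range(dim)) whose coordinate sits on an extreme face.
--     ext = [i for i in range(dim) if start[i] == 0 or start[i] == n - 1]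
--
--     def subsets(axes):
--         # All subsets of axes, first axis varying fastest (binary-counting order).
--         if not axes:
--             return [[]]
--         return [t for s in subsets(axes[1:]) for t in (s, [axes[0]] + s)]
--
--     wins = set()
--     for sub in subsets(ext)[1:]:  # skip the empty subset
--         end = tuple(n - 1 - start[j] if j in sub else start[j] for j in range(dim))
--         a = tuple(start)
--         wins.add((a, end) if a < end else (end, a))
--     return wins
-- ===== Notes on version B (the rewrite author's own statement) =====
-- stated objective: simpler
-- what changed: B drops A's integer bitmask encoding with its dictZ index map, delta_start bit-decoding array and full per-config rebuild, and instead enumerates the non-empty subsets of the extreme axes directly by structural recursion, building each endpoint with a single copy-and-flip comprehension (flip is the closed form n-1-start[j]).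
import Mathlib
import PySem

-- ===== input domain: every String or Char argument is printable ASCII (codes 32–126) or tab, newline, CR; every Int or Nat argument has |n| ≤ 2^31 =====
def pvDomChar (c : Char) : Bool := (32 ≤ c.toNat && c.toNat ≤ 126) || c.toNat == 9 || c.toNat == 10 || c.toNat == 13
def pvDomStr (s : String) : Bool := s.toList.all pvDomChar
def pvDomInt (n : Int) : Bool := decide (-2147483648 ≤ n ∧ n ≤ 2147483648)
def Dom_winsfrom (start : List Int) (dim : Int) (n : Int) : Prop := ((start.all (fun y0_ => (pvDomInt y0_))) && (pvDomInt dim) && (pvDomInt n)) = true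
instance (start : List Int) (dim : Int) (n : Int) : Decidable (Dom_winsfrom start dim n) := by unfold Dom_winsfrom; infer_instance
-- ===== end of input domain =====

-- B replaces A's integer bitmask encoding (dictZ index map + delta_start bit-decoding + full per-config
-- rebuild) by direct recursive enumeration of the non-empty subsets of the extreme axes with a
-- copy-and-flip comprehension; same value everywhere A returns (A raises IndexError iff dim > len(start)).


-- ===== PORT A =====

/-- Python's `<` on two int tuples: lexicographic, a proper prefix is smaller (shared by both ports). -/
def pyLtList : List Int → List Int → Bool
  | [], [] => false
  | [], _ :: _ => true
  | _ :: _, [] => false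
  | a :: s, b :: t => if a < b then true else if b < a then false else pyLtList s t

def winsfrom (start : List Int) (dim : Int) (n : Int) : List (List Int × List Int) :=
  -- zeros = {i if start[i] == 0 or start[i] == n-1 else None for i in range(dim)}; zeros.discard(None)
  let zeros : PySem.Set (Option Int) :=
    PySem.Set.discard
      (PySem.Set.ofList ((PySem.List.pyRange 0 dim 1).map (fun i =>
        if PySem.List.pyGetD start i 0 = 0 ∨ PySem.List.pyGetD start i 0 = n - 1
        then some i else none)))
      none
  -- Z = list(zeros)  (all remaining elements are `some`)
  let Z : List Int := zeros.filterMap id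
  -- dictZ = {Z[i]: i for i in range(len(Z))}
  let dictZ : PySem.Dict Int Int :=
    (PySem.List.pyRange 0 (Z.length : Int) 1).foldl
      (fun d i => d.insert (PySem.List.pyGetD Z i 0) i) PySem.Dict.empty
  if zeros.length = 0 then [] else
    (PySem.List.pyRange 1 ((2 : Int) ^ zeros.length) 1).foldl
      (fun wins i =>
        -- delta_start[k] = config % 2; config >>= 1
        let delta : List Int :=
          ((PySem.List.pyRange 0 (zeros.length : Int) 1).foldl
            (fun (st : List Int × Int) k =>
              (PySem.List.pySetD st.1 k (PySem.Int.mod st.2 2), st.2 >>> (1 : Nat)))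
            (List.replicate zeros.length (0 : Int), i)).1
        -- the j-loop filling end (initialised [-1]*dim)
        let e : List Int :=
          (PySem.List.pyRange 0 dim 1).foldl
            (fun e j =>
              let sj := PySem.List.pyGetD start j 0
              if sj = 0 then
                (if PySem.List.pyGetD delta (dictZ.getD j 0) 0 = 1
                 then PySem.List.pySetD e j (n - 1) else PySem.List.pySetD e j sj)
              else if sj = n - 1 then
                (if PySem.List.pyGetD delta (dictZ.getD j 0) 0 = 1
                 then PySem.List.pySetD e j 0 else PySem.List.pySetD e j sj)
              else PySem.List.pySetD e j sj)
            (List.replicate dim.toNat (-1))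
        if pyLtList start e then PySem.Set.add wins (start, e)
        else PySem.Set.add wins (e, start))
      PySem.Set.empty

-- ===== PORT B =====

/-- Source B's `subsets`: all subsets of `axes`, first axis varying fastest. -/
def altSubsets : List Int → List (List Int)
  | [] => [[]]
  | a :: t => (altSubsets t).flatMap (fun s => [s, a :: s])

def winsfrom_alt (start : List Int) (dim : Int) (n : Int) : List (List Int × List Int) :=
  let ext : List Int := (PySem.List.pyRange 0 dim 1).filter (fun i =>
    decide (PySem.List.pyGetD start i 0 = 0 ∨ PySem.List.pyGetD start i 0 = n - 1))
  ((altSubsets ext).drop 1).foldl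
    (fun wins sub =>
      let e : List Int := (PySem.List.pyRange 0 dim 1).map (fun j =>
        if j ∈ sub then n - 1 - PySem.List.pyGetD start j 0 else PySem.List.pyGetD start j 0)
      if pyLtList start e then PySem.Set.add wins (start, e)
      else PySem.Set.add wins (e, start))
    PySem.Set.empty

-- ===== PRECONDITION & SPEC =====
-- A (and B) raise IndexError exactly when dim > len(start); Pre_ excludes only those inputs.
def Pre_winsfrom (start : List Int) (dim : Int) (n : Int) : Prop := dim ≤ (start.length : Int)
instance (start : List Int) (dim : Int) (n : Int) : Decidable (Pre_winsfrom start dim n) := by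
  unfold Pre_winsfrom; infer_instance

def pvWitness_winsfrom : List Int × Int × Int := ([0, 1, 2], 3, 3)

def Spec_winsfrom (start : List Int) (dim : Int) (n : Int) (out : List (List Int × List Int)) : Prop := out = winsfrom_alt start dim n
instance (start : List Int) (dim : Int) (n : Int) (out : List (List Int × List Int)) : Decidable (Spec_winsfrom start dim n out) := by unfold Spec_winsfrom; infer_instance

-- ===== CLAIM (what is proved, stated in full; the proofs are below) =====
def Claim_equal_winsfrom : Prop := ∀ (start : List Int) (dim : Int) (n : Int), Dom_winsfrom start dim n → Pre_winsfrom start dim n → Spec_winsfrom start dim n (winsfrom start dim n)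

-- ===== LEMMAS AND PROOFS =====

-- discard of a non-member is the identity
theorem pv_discard_of_not_mem {α : Type} [BEq α] [LawfulBEq α] (s : PySem.Set α) (x : α)
    (h : x ∉ s) : PySem.Set.discard s x = s := by
  simp only [PySem.Set.discard]
  exact List.filter_eq_self.mpr (fun y hy => by
    have : y ≠ x := fun e => h (e ▸ hy)
    simp [this])

theorem pv_discard_discard {α : Type} [BEq α] [LawfulBEq α] (s : PySem.Set α) (x : α) :
    PySem.Set.discard (PySem.Set.discard s x) x = PySem.Set.discard s x := by
  simp only [PySem.Set.discard, List.filter_filter, Bool.and_self]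

theorem pv_zeros_eq (P : Int → Prop) [DecidablePred P] :
    ∀ (l : List Int), l.Nodup →
      PySem.Set.discard (PySem.Set.ofList (l.map (fun i => if P i then some i else none))) none
        = (l.filter (fun i => decide (P i))).map some := by
  intro l hl
  induction l with
  | nil => rfl
  | cons a t ih =>
    have hat : a ∉ t := (List.nodup_cons.mp hl).1
    have ht : t.Nodup := (List.nodup_cons.mp hl).2
    simp only [List.map_cons, PySem.Set.ofList_cons]
    by_cases hp : P a
    · simp only [hp, if_pos]
      have hmem : (some a) ∉ PySem.Set.ofList (t.map (fun i => if P i then some i else none)) := by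
        intro hmem
        rw [PySem.Set.mem_ofList] at hmem
        rcases List.mem_map.mp hmem with ⟨b, hb, hbe⟩
        by_cases hpb : P b
        · simp [hpb] at hbe; exact hat (hbe ▸ hb)
        · simp [hpb] at hbe
      rw [pv_discard_of_not_mem _ _ hmem]
      have : PySem.Set.discard (some a :: PySem.Set.ofList (t.map (fun i => if P i then some i else none))) none
          = some a :: PySem.Set.discard (PySem.Set.ofList (t.map (fun i => if P i then some i else none))) none := by
        simp [PySem.Set.discard, List.filter]
      rw [this, ih ht]
      simp [hp]
    · simp only [hp, if_neg, not_false_iff]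
      have : PySem.Set.discard (none :: PySem.Set.discard (PySem.Set.ofList (t.map (fun i => if P i then some i else none))) none) none
          = PySem.Set.discard (PySem.Set.discard (PySem.Set.ofList (t.map (fun i => if P i then some i else none))) none) none := by
        simp [PySem.Set.discard, List.filter]
      rw [this, pv_discard_discard, ih ht]
      simp [hp]

-- the delta_start bit-decoding loop, characterised entrywise
theorem pv_delta_getElem? :
    ∀ (z s : Nat) (acc : List Int) (c : Int) (t : Nat),
    (((List.range' s z).foldl (fun (st : List Int × Int) k =>
        (st.1.set k (PySem.Int.mod st.2 2), st.2 >>> (1 : Nat))) (acc, c)).1)[t]? =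
      if s ≤ t ∧ t < s + z ∧ t < acc.length then some (PySem.Int.mod (c >>> (t - s)) 2)
      else acc[t]? := by
  intro z
  induction z with
  | zero =>
    intro s acc c t
    have : ¬ (s ≤ t ∧ t < s + 0 ∧ t < acc.length) := by omega
    simp only [List.range'_zero, List.foldl_nil, if_neg this]
  | succ z ih =>
    intro s acc c t
    rw [List.range'_succ, List.foldl_cons]
    rw [ih (s+1) (acc.set s (PySem.Int.mod c 2)) (c >>> (1:Nat)) t]
    rcases Nat.lt_trichotomy t s with hts | hts | hts
    · have h1 : ¬ (s + 1 ≤ t) := by omega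
      have h2 : ¬ (s ≤ t) := by omega
      simp only [h1, h2, false_and, if_neg, not_false_iff]
      rw [List.getElem?_set]
      simp [show s ≠ t by omega]
    · subst hts
      have h1 : ¬ (t + 1 ≤ t) := by omega
      simp only [h1, false_and, if_neg, not_false_iff]
      rw [List.getElem?_set]
      by_cases hlen : t < acc.length
      · simp [hlen]
      · simp [hlen]
    · have harr : (c >>> (1:Nat)) >>> (t - (s+1)) = c >>> (t - s) := by
        rw [← Int.shiftRight_add]
        congr 1
        omega
      rw [List.getElem?_set]
      simp only [List.length_set]
      have hne : s ≠ t := by omega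
      simp only [hne, if_false]
      by_cases hin : s + 1 ≤ t ∧ t < s + 1 + z ∧ t < acc.length
      · simp only [hin, and_self, if_pos, harr]
        have : s ≤ t ∧ t < s + (z+1) ∧ t < acc.length := by omega
        simp [this]
      · have : ¬ (s ≤ t ∧ t < s + (z+1) ∧ t < acc.length) := by omega
        simp only [if_neg this]
        simp only [if_neg hin]

-- the end-building loop (value at each index independent of the accumulator)
theorem pv_setfold_getElem? (V : Nat → Int) :
    ∀ (z s : Nat) (acc : List Int) (t : Nat),
    ((List.range' s z).foldl (fun e k => e.set k (V k)) acc)[t]? =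
      if s ≤ t ∧ t < s + z ∧ t < acc.length then some (V t) else acc[t]? := by
  intro z
  induction z with
  | zero =>
    intro s acc t
    have : ¬ (s ≤ t ∧ t < s + 0 ∧ t < acc.length) := by omega
    simp only [List.range'_zero, List.foldl_nil, if_neg this]
  | succ z ih =>
    intro s acc t
    rw [List.range'_succ, List.foldl_cons, ih (s+1) (acc.set s (V s)) t]
    rcases Nat.lt_trichotomy t s with hts | hts | hts
    · have h1 : ¬ (s + 1 ≤ t) := by omega
      have h2 : ¬ (s ≤ t) := by omega
      simp only [h1, h2, false_and, if_neg, not_false_iff]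
      rw [List.getElem?_set]
      simp [show s ≠ t by omega]
    · subst hts
      have h1 : ¬ (t + 1 ≤ t) := by omega
      simp only [h1, false_and, if_neg, not_false_iff]
      rw [List.getElem?_set]
      by_cases hlen : t < acc.length
      · simp [hlen]
      · simp [hlen]
    · rw [List.getElem?_set]
      simp only [List.length_set]
      have hne : s ≠ t := by omega
      simp only [hne, if_false]
      by_cases hin : s + 1 ≤ t ∧ t < s + 1 + z ∧ t < acc.length
      · simp only [hin, and_self, if_pos]
        have : s ≤ t ∧ t < s + (z+1) ∧ t < acc.length := by omega
        simp [this]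
      · have : ¬ (s ≤ t ∧ t < s + (z+1) ∧ t < acc.length) := by omega
        simp only [if_neg this]
        simp only [if_neg hin]


theorem pv_length_flatMap_pair {α β : Type} (l : List α) (f g : α → β) :
    (l.flatMap (fun s => [f s, g s])).length = 2 * l.length := by
  induction l with
  | nil => rfl
  | cons x xs ih =>
    simp only [List.flatMap_cons, List.length_append, ih, List.length_cons]
    simp
    ring

theorem pv_length_altSubsets : ∀ (L : List Int), (altSubsets L).length = 2 ^ L.length := by
  intro L
  induction L with
  | nil => rfl
  | cons a t ih =>
    calc (altSubsets (a :: t)).length = 2 * (altSubsets t).length := by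
          exact pv_length_flatMap_pair (altSubsets t) (fun s => s) (fun s => a :: s)
      _ = 2 ^ (a :: t).length := by rw [ih]; simp [pow_succ]; ring

theorem pv_flatMap_pair_getElem? {α β : Type} (l : List α) (f g : α → β) :
    ∀ (m : Nat), (l.flatMap (fun s => [f s, g s]))[m]? =
      (l[m / 2]?).map (fun s => if m % 2 = 1 then g s else f s) := by
  induction l with
  | nil => intro m; simp
  | cons x l ih =>
    intro m
    match m with
    | 0 => simp
    | 1 => simp
    | (m+2) =>
      have h2 : (m + 2) / 2 = m / 2 + 1 := by omega
      have h3 : (m + 2) % 2 = m % 2 := by omega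
      simp only [List.flatMap_cons, List.cons_append, List.nil_append,
        List.getElem?_cons_succ, h2, h3]
      exact ih m

theorem pv_mem_altSubsets : ∀ (L : List Int) (m : Nat) (sub : List Int),
    (altSubsets L)[m]? = some sub →
    ∀ j, j ∈ sub ↔ ∃ k, ∃ hk : k < L.length, L[k] = j ∧ m.testBit k = true := by
  intro L
  induction L with
  | nil =>
    intro m sub h j
    match m with
    | 0 =>
      simp only [altSubsets, List.getElem?_cons_zero, Option.some.injEq] at h
      subst h
      simp
    | (m+1) => simp [altSubsets] at h
  | cons a t ih =>
    intro m sub h j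
    rw [show altSubsets (a :: t) = (altSubsets t).flatMap (fun s => [s, a :: s]) from rfl,
      pv_flatMap_pair_getElem?] at h
    rcases Option.map_eq_some_iff.mp h with ⟨s, hs, rfl⟩
    have ihs := ih (m / 2) s hs j
    constructor
    · intro hj
      by_cases hodd : m % 2 = 1
      · simp only [hodd, if_pos] at hj
        rcases List.mem_cons.mp hj with rfl | hj'
        · exact ⟨0, by simp, by simp [Nat.testBit_zero, hodd]⟩
        · rcases ihs.mp hj' with ⟨k, hk, hkj, hbit⟩
          exact ⟨k + 1, by simpa using Nat.succ_lt_succ hk,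
            by simpa using hkj, by simpa [Nat.testBit_succ] using hbit⟩
      · simp only [hodd, if_neg, not_false_iff] at hj
        rcases ihs.mp hj with ⟨k, hk, hkj, hbit⟩
        exact ⟨k + 1, by simpa using Nat.succ_lt_succ hk,
          by simpa using hkj, by simpa [Nat.testBit_succ] using hbit⟩
    · rintro ⟨k, hk, hkj, hbit⟩
      match k with
      | 0 =>
        simp only [List.getElem_cons_zero] at hkj
        rw [Nat.testBit_zero] at hbit
        have hodd : m % 2 = 1 := by simpa using hbit
        subst hkj
        simp [hodd]
      | (k+1) =>
        simp only [List.getElem_cons_succ] at hkj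
        rw [Nat.testBit_succ] at hbit
        have hk2 : k < t.length := by simp only [List.length_cons] at hk; omega
        have hmem : j ∈ s := ihs.mpr ⟨k, hk2, hkj, by simpa using hbit⟩
        split <;> simp [hmem]

-- dictZ lookup: for nodup Z, at Z[k] the dict returns k
theorem pv_dict_getD (Z : List Int) (hZ : Z.Nodup) :
    ∀ (m : Nat), m ≤ Z.length → ∀ (k : Nat) (hk : k < Z.length),
    ((List.range' 0 m).foldl (fun (d : PySem.Dict Int Int) (i : Nat) =>
        d.insert (Z.getD i 0) (i : Int)) PySem.Dict.empty).getD (Z[k]) 0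
      = if k < m then (k : Int) else 0 := by
  intro m
  induction m with
  | zero => intro _ k hk; simp [PySem.Dict.getD_empty]
  | succ m ih =>
    intro hm k hk
    rw [show List.range' 0 (m+1) = List.range' 0 m ++ [m] from by
      rw [List.range'_1_concat]; simp, List.foldl_append, List.foldl_cons, List.foldl_nil]
    rw [PySem.Dict.getD_insert]
    have hmlen : m < Z.length := by omega
    rw [List.getD_eq_getElem Z 0 hmlen]
    by_cases hkm : k = m
    · subst hkm; simp
    · have hne : Z[k] ≠ Z[m] := fun e => hkm (List.Nodup.getElem_inj_iff hZ |>.mp e)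
      rw [if_neg hne, ih (by omega) k hk]
      by_cases h : k < m
      · simp [h, show k < m + 1 by omega]
      · simp [h, show ¬ k < m + 1 by omega]

-- proof-side abbreviations
def pvExt (start : List Int) (dim n : Int) : List Int :=
  (PySem.List.pyRange 0 dim 1).filter (fun i =>
    decide (PySem.List.pyGetD start i 0 = 0 ∨ PySem.List.pyGetD start i 0 = n - 1))

def pvOp (start e : List Int) : List Int × List Int :=
  if pyLtList start e then (start, e) else (e, start)

def pvEndB (start : List Int) (dim n : Int) (sub : List Int) : List Int :=
  (PySem.List.pyRange 0 dim 1).map (fun j =>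
    if j ∈ sub then n - 1 - PySem.List.pyGetD start j 0 else PySem.List.pyGetD start j 0)

/-- A's endpoint for config `i`, with `zeros`/`Z` already identified with `pvExt`. -/
def pvEndA (start : List Int) (dim n : Int) (i : Int) : List Int :=
  let Z := pvExt start dim n
  let dictZ : PySem.Dict Int Int :=
    (PySem.List.pyRange 0 (Z.length : Int) 1).foldl
      (fun d i => d.insert (PySem.List.pyGetD Z i 0) i) PySem.Dict.empty
  let delta : List Int :=
    ((PySem.List.pyRange 0 (Z.length : Int) 1).foldl
      (fun (st : List Int × Int) k =>
        (PySem.List.pySetD st.1 k (PySem.Int.mod st.2 2), st.2 >>> (1 : Nat)))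
      (List.replicate Z.length (0 : Int), i)).1
  (PySem.List.pyRange 0 dim 1).foldl
    (fun e j =>
      let sj := PySem.List.pyGetD start j 0
      if sj = 0 then
        (if PySem.List.pyGetD delta (dictZ.getD j 0) 0 = 1
         then PySem.List.pySetD e j (n - 1) else PySem.List.pySetD e j sj)
      else if sj = n - 1 then
        (if PySem.List.pyGetD delta (dictZ.getD j 0) 0 = 1
         then PySem.List.pySetD e j 0 else PySem.List.pySetD e j sj)
      else PySem.List.pySetD e j sj)
    (List.replicate dim.toNat (-1))

theorem pv_foldl_op {α : Type} (l : List α) (start : List Int) (E : α → List Int)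
    (init : PySem.Set (List Int × List Int)) :
    l.foldl (fun wins x => if pyLtList start (E x) then PySem.Set.add wins (start, E x)
                           else PySem.Set.add wins (E x, start)) init
      = (l.map (fun x => pvOp start (E x))).foldl PySem.Set.add init := by
  rw [List.foldl_map]
  have hfun : (fun (wins : PySem.Set (List Int × List Int)) x => PySem.Set.add wins (pvOp start (E x)))
      = fun wins x => if pyLtList start (E x) then PySem.Set.add wins (start, E x)
                      else PySem.Set.add wins (E x, start) := by
    funext wins x
    unfold pvOp
    split <;> rfl
  rw [hfun]

theorem pv_filterMap_map_some (l : List Int) : (l.map some).filterMap id = l := by simp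

theorem pv_A_eq (start : List Int) (dim n : Int) (hne : (pvExt start dim n).length ≠ 0) :
    winsfrom start dim n =
      ((PySem.List.pyRange 1 ((2 : Int) ^ (pvExt start dim n).length) 1).map
        (fun i => pvOp start (pvEndA start dim n i))).foldl PySem.Set.add PySem.Set.empty := by
  have hz := pv_zeros_eq
      (fun i => PySem.List.pyGetD start i 0 = 0 ∨ PySem.List.pyGetD start i 0 = n - 1)
      (PySem.List.pyRange 0 dim 1) (PySem.List.nodup_pyRange_one 0 dim)
  unfold pvExt at hne ⊢
  simp only [winsfrom, hz, pv_filterMap_map_some, List.length_map]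
  rw [if_neg hne]
  exact pv_foldl_op _ start _ _

theorem pv_A_empty (start : List Int) (dim n : Int) (hz : (pvExt start dim n).length = 0) :
    winsfrom start dim n = [] := by
  have hzeq := pv_zeros_eq
      (fun i => PySem.List.pyGetD start i 0 = 0 ∨ PySem.List.pyGetD start i 0 = n - 1)
      (PySem.List.pyRange 0 dim 1) (PySem.List.nodup_pyRange_one 0 dim)
  unfold pvExt at hz
  simp only [winsfrom, hzeq, pv_filterMap_map_some, List.length_map]
  rw [if_pos hz]

theorem pv_alt_eq (start : List Int) (dim n : Int) :
    winsfrom_alt start dim n =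
      (((altSubsets (pvExt start dim n)).drop 1).map
        (fun sub => pvOp start (pvEndB start dim n sub))).foldl PySem.Set.add PySem.Set.empty := by
  unfold winsfrom_alt
  exact pv_foldl_op _ start _ _

def pvVA (start : List Int) (n : Int) (delta : List Int) (dictZ : PySem.Dict Int Int) (j : Int) : Int :=
  let sj := PySem.List.pyGetD start j 0
  let b := PySem.List.pyGetD delta (dictZ.getD j 0) 0
  if sj = 0 then (if b = 1 then n - 1 else sj)
  else if sj = n - 1 then (if b = 1 then 0 else sj)
  else sj

theorem pv_body_eq (start : List Int) (n : Int) (delta : List Int) (dictZ : PySem.Dict Int Int) :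
    (fun (e : List Int) (y : Nat) =>
      if PySem.List.pyGetD start (0 + (y : Int)) 0 = 0 then
        (if PySem.List.pyGetD delta (dictZ.getD (0 + (y : Int)) 0) 0 = 1
         then PySem.List.pySetD e (0 + (y : Int)) (n - 1)
         else PySem.List.pySetD e (0 + (y : Int)) (PySem.List.pyGetD start (0 + (y : Int)) 0))
      else if PySem.List.pyGetD start (0 + (y : Int)) 0 = n - 1 then
        (if PySem.List.pyGetD delta (dictZ.getD (0 + (y : Int)) 0) 0 = 1
         then PySem.List.pySetD e (0 + (y : Int)) 0
         else PySem.List.pySetD e (0 + (y : Int)) (PySem.List.pyGetD start (0 + (y : Int)) 0))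
      else PySem.List.pySetD e (0 + (y : Int)) (PySem.List.pyGetD start (0 + (y : Int)) 0))
    = fun e y => e.set y (pvVA start n delta dictZ (0 + (y : Int))) := by
  funext e y
  simp only [pvVA, zero_add, PySem.List.pySetD_natCast]
  split_ifs <;> rfl

theorem pv_end_eq (start : List Int) (dim n : Int) (m : Nat) (sub : List Int)
    (hsub : (altSubsets (pvExt start dim n))[m + 1]? = some sub) :
    pvEndA start dim n (1 + (m : Int)) = pvEndB start dim n sub := by
  have hnodup : (pvExt start dim n).Nodup :=
    (PySem.List.nodup_pyRange_one 0 dim).filter _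
  have hsubmem := pv_mem_altSubsets (pvExt start dim n) (m + 1) sub hsub
  have hsubext : ∀ j, j ∈ sub → j ∈ pvExt start dim n := by
    intro j hj
    rcases (hsubmem j).mp hj with ⟨k, hk, hkj, _⟩
    exact hkj ▸ List.getElem_mem hk
  have hsubbit : ∀ (k0 : Nat) (hk0 : k0 < (pvExt start dim n).length),
      ((pvExt start dim n)[k0] ∈ sub ↔ (m + 1).testBit k0 = true) := by
    intro k0 hk0
    rw [hsubmem]
    constructor
    · rintro ⟨k, hk, hkj, hbit⟩
      have hkk : k = k0 := (List.Nodup.getElem_inj_iff hnodup).mp hkj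
      exact hkk ▸ hbit
    · intro hbit; exact ⟨k0, hk0, rfl, hbit⟩
  set z := (pvExt start dim n).length with hzdef
  -- the dict lookup
  have hdict : ∀ (k0 : Nat), k0 < z →
      ((PySem.List.pyRange 0 (z : Int) 1).foldl
        (fun (d : PySem.Dict Int Int) i => d.insert (PySem.List.pyGetD (pvExt start dim n) i 0) i)
        PySem.Dict.empty).getD ((pvExt start dim n).getD k0 0) 0 = (k0 : Int) := by
    intro k0 hk0
    rw [PySem.List.pyRange_one 0 (z : Int), List.foldl_map]
    have hc : ((z : Int) - 0).toNat = z := by omega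
    rw [hc, List.range_eq_range']
    have hconv : (fun (d : PySem.Dict Int Int) (k : Nat) =>
          d.insert (PySem.List.pyGetD (pvExt start dim n) ((0 : Int) + (k : Int)) 0) ((0 : Int) + (k : Int)))
        = fun d k => d.insert ((pvExt start dim n).getD k 0) (k : Int) := by
      funext d k
      rw [zero_add, PySem.List.pyGetD_natCast]
    rw [hconv]
    rw [List.getD_eq_getElem _ 0 hk0]
    have := pv_dict_getD (pvExt start dim n) hnodup z (le_refl z) k0 hk0
    rw [this, if_pos hk0]
  -- the delta entries
  have hdelta : ∀ (k0 : Nat), k0 < z →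
      PySem.List.pyGetD
        (((PySem.List.pyRange 0 (z : Int) 1).foldl
          (fun (st : List Int × Int) k =>
            (PySem.List.pySetD st.1 k (PySem.Int.mod st.2 2), st.2 >>> (1 : Nat)))
          (List.replicate z (0 : Int), 1 + (m : Int))).1)
        (k0 : Int) 0
      = (((m + 1) >>> k0 % 2 : Nat) : Int) := by
    intro k0 hk0
    rw [PySem.List.pyRange_one 0 (z : Int), List.foldl_map]
    have hc : ((z : Int) - 0).toNat = z := by omega
    rw [hc, List.range_eq_range']
    have hconv : (fun (st : List Int × Int) (k : Nat) =>
          (PySem.List.pySetD st.1 ((0 : Int) + (k : Int)) (PySem.Int.mod st.2 2), st.2 >>> (1 : Nat)))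
        = fun (st : List Int × Int) (k : Nat) => (st.1.set k (PySem.Int.mod st.2 2), st.2 >>> (1 : Nat)) := by
      funext st k
      rw [zero_add, PySem.List.pySetD_natCast]
    rw [hconv, PySem.List.pyGetD_natCast, List.getD_eq_getElem?_getD]
    rw [pv_delta_getElem? z 0 (List.replicate z (0 : Int)) (1 + (m : Int)) k0]
    have hin : 0 ≤ k0 ∧ k0 < 0 + z ∧ k0 < (List.replicate z (0 : Int)).length := by
      simp; omega
    rw [if_pos hin]
    have hcast : (1 + (m : Int)) = ((m + 1 : Nat) : Int) := by push_cast; ring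
    rw [hcast]
    have hshift : ((m + 1 : Nat) : Int) >>> (k0 - 0) = (((m + 1) >>> k0 : Nat) : Int) := by
      simp
    rw [hshift]
    rw [show ((2 : Int) = ((2 : Nat) : Int)) from rfl, PySem.Int.mod_natCast]
    rfl
  -- now compare the two endpoint lists
  simp only [pvEndA, pvEndB]
  rw [← hzdef]
  apply List.ext_getElem?
  intro t
  -- A side: rewrite the j-loop to a set-fold
  rw [PySem.List.pyRange_one 0 dim, List.foldl_map, List.getElem?_map]
  rw [pv_body_eq start n]
  simp only [Int.sub_zero, List.getElem?_map]
  rw [List.range_eq_range', pv_setfold_getElem?]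
  by_cases htd : t < dim.toNat
  · rw [if_pos (by simp only [List.length_replicate]; omega), List.getElem?_range' htd]
    simp only [Option.map_some, one_mul, Nat.zero_add]
    congr 1
    simp only [zero_add]
    by_cases hp : PySem.List.pyGetD start (t : Int) 0 = 0 ∨
        PySem.List.pyGetD start (t : Int) 0 = n - 1
    · have hjext : ((t : Int)) ∈ pvExt start dim n := by
        unfold pvExt
        rw [List.mem_filter]
        refine ⟨?_, by simpa using hp⟩
        rw [PySem.List.mem_pyRange_one]
        omega
      have hk0lt : List.idxOf ((t : Int)) (pvExt start dim n) < (pvExt start dim n).length :=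
        List.idxOf_lt_length_of_mem hjext
      set k0 := List.idxOf ((t : Int)) (pvExt start dim n) with hk0def
      have hk0 : k0 < z := by rw [hzdef]; exact hk0lt
      have hgetk0 : (pvExt start dim n)[k0]'hk0lt = (t : Int) := List.getElem_idxOf hk0lt
      have hdt := hdict k0 hk0
      rw [List.getD_eq_getElem _ 0 hk0lt, hgetk0] at hdt
      have hbt := hdelta k0 hk0
      have hmemiff : ((t : Int) ∈ sub) ↔ (m + 1).testBit k0 = true := by
        rw [← hgetk0]; exact hsubbit k0 hk0lt
      rw [← Nat.decide_shiftRight_mod_two_eq_one] at hmemiff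
      simp only [pvVA]
      rw [hdt, hbt]
      by_cases hb : (m + 1) >>> k0 % 2 = 1
      · have hbit1 : (((m + 1) >>> k0 % 2 : Nat) : Int) = 1 := by rw [hb]; rfl
        have hmem : (t : Int) ∈ sub := hmemiff.mpr (decide_eq_true hb)
        rw [if_pos hmem]
        by_cases hsj0 : PySem.List.pyGetD start (t : Int) 0 = 0
        · simp [hsj0, hbit1]
        · have hsjn : PySem.List.pyGetD start (t : Int) 0 = n - 1 := hp.resolve_left hsj0
          rw [if_neg hsj0, if_pos hsjn, if_pos hbit1, hsjn]
          ring
      · have hbit0 : (((m + 1) >>> k0 % 2 : Nat) : Int) ≠ 1 := by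
          intro he
          exact hb (by exact_mod_cast he)
        have hmem : (t : Int) ∉ sub := by
          intro hm
          exact hb (of_decide_eq_true (hmemiff.mp hm))
        rw [if_neg hmem]
        by_cases hsj0 : PySem.List.pyGetD start (t : Int) 0 = 0
        · rw [if_pos hsj0, if_neg hbit0, hsj0]
        · rw [if_neg hsj0]
          by_cases hsjn : PySem.List.pyGetD start (t : Int) 0 = n - 1
          · rw [if_pos hsjn, if_neg hbit0]
          · rw [if_neg hsjn]
    · rw [not_or] at hp
      have hnmem : (t : Int) ∉ sub := by
        intro hm
        have hx := hsubext _ hm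
        unfold pvExt at hx
        rw [List.mem_filter] at hx
        have := hx.2
        simp only [decide_eq_true_eq] at this
        rcases this with h0 | h1
        · exact hp.1 h0
        · exact hp.2 h1
      rw [if_neg hnmem]
      simp only [pvVA]
      rw [if_neg hp.1, if_neg hp.2]
  · have hcond : ¬ (0 ≤ t ∧ t < 0 + dim.toNat ∧ t < (List.replicate dim.toNat (-1 : Int)).length) := by
      simp only [List.length_replicate]; omega
    have hrnone : (List.range' 0 dim.toNat)[t]? = none := by
      rw [List.getElem?_eq_none_iff]
      simpa using htd
    rw [if_neg hcond, hrnone]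
    simp [htd]

theorem pv_maps_eq (start : List Int) (dim n : Int) :
    (PySem.List.pyRange 1 ((2 : Int) ^ (pvExt start dim n).length) 1).map
        (fun i => pvOp start (pvEndA start dim n i))
      = ((altSubsets (pvExt start dim n)).drop 1).map
        (fun sub => pvOp start (pvEndB start dim n sub)) := by
  set z := (pvExt start dim n).length with hzdef
  have hcast : ((2 : Int) ^ z) = ((2 ^ z : Nat) : Int) := by push_cast; ring
  have hlenA : ((2 : Int) ^ z - 1).toNat = 2 ^ z - 1 := by rw [hcast]; omega
  have hone : 1 ≤ 2 ^ z := Nat.one_le_two_pow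
  apply List.ext_getElem?
  intro t
  rw [List.getElem?_map, List.getElem?_map, PySem.List.getElem?_pyRange_one,
    List.getElem?_drop, show 1 + t = t + 1 from Nat.add_comm 1 t]
  by_cases ht : t < 2 ^ z - 1
  · rw [if_pos (by omega)]
    have hlt : t + 1 < (altSubsets (pvExt start dim n)).length := by
      rw [pv_length_altSubsets, ← hzdef]; omega
    rw [List.getElem?_eq_getElem hlt]
    simp only [Option.map_some]
    rw [pv_end_eq start dim n t _ (List.getElem?_eq_getElem hlt)]
  · rw [if_neg (by omega)]
    have hnone : (altSubsets (pvExt start dim n))[t + 1]? = none := by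
      rw [List.getElem?_eq_none_iff, pv_length_altSubsets, ← hzdef]
      omega
    rw [hnone]
    rfl

theorem winsfrom_eq (start : List Int) (dim n : Int) :
    winsfrom start dim n = winsfrom_alt start dim n := by
  by_cases hz : (pvExt start dim n).length = 0
  · have hnil : pvExt start dim n = [] := List.length_eq_zero_iff.mp hz
    rw [pv_A_empty start dim n hz, pv_alt_eq, hnil]
    rfl
  · rw [pv_A_eq start dim n hz, pv_alt_eq, pv_maps_eq start dim n]

-- ===== VERDICT (by name: the statement is the Claim_ definition above) =====
theorem winsfrom_spec : Claim_equal_winsfrom := by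
  intro start dim n _ _
  unfold Spec_winsfrom
  exact winsfrom_eq start dim n
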